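-- pv_equiv track=rewrite | github.com/bhumibawalia104-arch/Library-managment | return_books.py | calculate_fine
-- ===== SOURCE A (Python) =====
-- def calculate_fine(late_days):
--     fine = 0
--     base = 10
--
--     for i in range(1, late_days + 1):
--         week = (i - 1) // 7 + 1
--         rate = base
--
--         for j in range(1, week + 1):
--             rate *= j
--
--         fine += rate
--
--     return fine
-- ===== SOURCE B (Python) =====
-- def calculate_fine(late_days):
--     # Group late days by week: each day of week w costs 10*w!; use an
--     # incremental factorial and a closed count of days per week.
--     if late_days <= 0:
--         return 0
--     full, rem = divmod(late_days, 7)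
--     fine = 0
--     fact = 1
--     for w in range(1, full + 1):
--         fact *= w
--         fine += 70 * fact
--     return fine + rem * 10 * fact * (full + 1)
-- ===== Notes on version B (the rewrite author's own statement) =====
-- stated objective: faster
-- what changed: B iterates once over weeks with an incrementally maintained factorial and a closed-form day count per week, instead of A's per-day loop that recomputes the factorial from scratch for every day.
import Mathlib
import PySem

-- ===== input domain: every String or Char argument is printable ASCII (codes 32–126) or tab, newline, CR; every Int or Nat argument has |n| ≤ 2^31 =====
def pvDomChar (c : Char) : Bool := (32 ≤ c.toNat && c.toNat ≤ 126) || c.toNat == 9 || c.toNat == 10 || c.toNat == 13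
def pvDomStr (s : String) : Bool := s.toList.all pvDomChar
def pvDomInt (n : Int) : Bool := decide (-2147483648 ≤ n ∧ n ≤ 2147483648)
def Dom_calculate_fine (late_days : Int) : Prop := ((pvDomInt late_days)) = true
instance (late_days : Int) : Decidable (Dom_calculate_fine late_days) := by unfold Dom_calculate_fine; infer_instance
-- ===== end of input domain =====

-- B replaces A's per-day loop (which rebuilds the week's factorial from scratch
-- for every day) by a single loop over full weeks with an incremental factorial
-- and a closed-form day count; measured faster (asymptotic).

-- ===== PORT A =====
def calculate_fine (late_days : Int) : Int :=
  (PySem.List.pyRange 1 (late_days + 1) 1).foldl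
    (fun fine i =>
      let week := PySem.Int.floordiv (i - 1) 7 + 1
      let rate := (PySem.List.pyRange 1 (week + 1) 1).foldl (fun r j => r * j) 10
      fine + rate)
    0

-- ===== PORT B =====
def calculate_fine_alt (late_days : Int) : Int :=
  if late_days ≤ 0 then 0
  else
    let full := PySem.Int.floordiv late_days 7
    let rem := PySem.Int.mod late_days 7
    let st := (PySem.List.pyRange 1 (full + 1) 1).foldl
      (fun (st : Int × Int) w =>
        let fact := st.2 * w
        (st.1 + 70 * fact, fact))
      (0, 1)
    st.1 + rem * 10 * st.2 * (full + 1)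

-- ===== PRECONDITION & SPEC =====
def Spec_calculate_fine (late_days : Int) (out : Int) : Prop := out = calculate_fine_alt late_days
instance (late_days : Int) (out : Int) : Decidable (Spec_calculate_fine late_days out) := by unfold Spec_calculate_fine; infer_instance

-- ===== CLAIM (what is proved, stated in full; the proofs are below) =====
def Claim_equal_calculate_fine : Prop := ∀ (late_days : Int), Dom_calculate_fine late_days → Spec_calculate_fine late_days (calculate_fine late_days)

-- ===== LEMMAS AND PROOFS =====

-- reference value: F n = Σ_{i=1..n} 10 * ((i-1)/7 + 1)!
def pvF : Nat → Int
  | 0 => 0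
  | n + 1 => pvF n + 10 * Int.ofNat (Nat.factorial (n / 7 + 1))

-- sum over full weeks: S k = Σ_{w=1..k} 70 * w!
def pvS : Nat → Int
  | 0 => 0
  | k + 1 => pvS k + 70 * Int.ofNat (Nat.factorial (k + 1))

-- inner loop of A computes c * w!
lemma inner_loop (w : Nat) (c : Int) :
    (PySem.List.pyRange 1 ((w : Int) + 1) 1).foldl (fun r j => r * j) c
      = c * Int.ofNat (Nat.factorial w) := by
  induction w generalizing c with
  | zero => simp [PySem.List.pyRange_one_eq_nil, Nat.factorial]
  | succ n ih =>
    rw [show ((n + 1 : Nat) : Int) + 1 = ((n : Int) + 1) + 1 by push_cast; ring,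
      PySem.List.pyRange_one_succ_right (show (1:Int) ≤ (n : Int) + 1 by omega), List.foldl_append]
    simp only [List.foldl]
    rw [ih]
    simp [Nat.factorial]
    ring

-- A's outer loop equals pvF on naturals
lemma A_eq_F (n : Nat) : calculate_fine (n : Int) = pvF n := by
  induction n with
  | zero => simp [calculate_fine, PySem.List.pyRange_one_eq_nil, pvF]
  | succ n ih =>
    unfold calculate_fine at *
    rw [show ((n + 1 : Nat) : Int) + 1 = ((n : Int) + 1) + 1 by push_cast; ring,
      PySem.List.pyRange_one_succ_right (show (1:Int) ≤ (n : Int) + 1 by omega), List.foldl_append]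
    simp only [List.foldl]
    rw [ih]
    have hw : PySem.Int.floordiv (((n : Int) + 1) - 1) 7 + 1 = ((n / 7 + 1 : Nat) : Int) := by
      rw [show ((n : Int) + 1) - 1 = (n : Int) by ring]
      rw [show ((7 : Int)) = ((7 : Nat) : Int) by norm_num, PySem.Int.floordiv_natCast]
      push_cast; ring
    rw [hw, inner_loop (n / 7 + 1) 10]
    simp [pvF]

-- B's week loop computes (pvS k, k!)
lemma B_loop (k : Nat) :
    (PySem.List.pyRange 1 ((k : Int) + 1) 1).foldl
      (fun (st : Int × Int) w => let fact := st.2 * w; (st.1 + 70 * fact, fact)) (0, 1)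
      = (pvS k, Int.ofNat (Nat.factorial k)) := by
  induction k with
  | zero => simp [PySem.List.pyRange_one_eq_nil, pvS, Nat.factorial]
  | succ n ih =>
    rw [show ((n + 1 : Nat) : Int) + 1 = ((n : Int) + 1) + 1 by push_cast; ring,
      PySem.List.pyRange_one_succ_right (show (1:Int) ≤ (n : Int) + 1 by omega), List.foldl_append]
    simp only [List.foldl]
    rw [ih]
    simp [pvS, Nat.factorial]
    ring

-- per-week closed form of the per-day sum
lemma F_closed (n : Nat) :
    pvF n = pvS (n / 7) + ((n % 7 : Nat) : Int) * 10 * Int.ofNat (Nat.factorial (n / 7 + 1)) := by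
  induction n with
  | zero => simp [pvF, pvS]
  | succ n ih =>
    by_cases h : n % 7 = 6
    · have hd : (n + 1) / 7 = n / 7 + 1 := by omega
      have hm : (n + 1) % 7 = 0 := by omega
      rw [pvF, ih, hd, hm, h]
      rw [show pvS (n / 7 + 1) = pvS (n / 7) + 70 * Int.ofNat (Nat.factorial (n / 7 + 1)) from rfl]
      simp [Nat.factorial]
      ring
    · have hd : (n + 1) / 7 = n / 7 := by omega
      have hm : (n + 1) % 7 = n % 7 + 1 := by omega
      rw [pvF, ih, hd, hm]
      push_cast; ring

lemma B_eq_F (n : Nat) : calculate_fine_alt (n : Int) = pvF n := by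
  unfold calculate_fine_alt
  by_cases h : (n : Int) ≤ 0
  · have : n = 0 := by omega
    subst this; simp [pvF]
  · rw [if_neg h]
    have h7 : ((7 : Int)) = ((7 : Nat) : Int) := by norm_num
    simp only [h7, PySem.Int.floordiv_natCast, PySem.Int.mod_natCast]
    rw [B_loop (n / 7), F_closed n]
    simp [Nat.factorial]
    ring

-- ===== VERDICT (by name: the statement is the Claim_ definition above) =====
theorem calculate_fine_spec : Claim_equal_calculate_fine := by
  intro late_days _
  unfold Spec_calculate_fine
  by_cases h : late_days ≤ 0
  · have hA : calculate_fine late_days = 0 := by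
      unfold calculate_fine
      rw [PySem.List.pyRange_one_eq_nil (show late_days + 1 ≤ 1 by omega)]
      rfl
    have hB : calculate_fine_alt late_days = 0 := by
      unfold calculate_fine_alt; rw [if_pos h]
    rw [hA, hB]
  · have hn : late_days = ((late_days.toNat : Nat) : Int) := by omega
    rw [hn, A_eq_F, B_eq_F]
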